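-- pv_equiv track=rewrite | github.com/vikas11kendre/microfrontend-ecommerce-poc | .agents/skills/graphify/serve.py | _infer_context_filters
-- ===== SOURCE A (Python) =====
-- def _strip_diacritics(text: str) -> str:
--     import unicodedata
--     nfkd = unicodedata.normalize("NFKD", text)
--     return "".join(c for c in nfkd if not unicodedata.combining(c))
--
-- _CONTEXT_HINTS: tuple[tuple[str, tuple[str, ...]], ...] = (
--     ("call", ("call", "calls", "called", "invoke", "invokes", "invoked")),
--     ("import", ("import", "imports", "imported", "module", "modules")),
--     ("field", ("field", "fields", "member", "members", "property", "properties")),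
--     ("parameter_type", ("parameter", "parameters", "param", "params", "argument", "arguments")),
--     ("return_type", ("return", "returns", "returned")),
--     ("generic_arg", ("generic", "generics", "template", "templates")),
-- )
--
-- def _infer_context_filters(question: str) -> list[str]:
--     lowered = {
--         _strip_diacritics(token).lower()
--         for token in question.replace("?", " ").replace(",", " ").split()
--     }
--     inferred: list[str] = []
--     for context, hints in _CONTEXT_HINTS:
--         if any(hint in lowered for hint in hints):
--             inferred.append(context)
--     return inferred
-- ===== SOURCE B (Python) =====
-- def _strip_diacritics(text: str) -> str:
--     import unicodedata
--     nfkd = unicodedata.normalize("NFKD", text)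
--     return "".join(c for c in nfkd if not unicodedata.combining(c))
--
-- _CONTEXT_HINTS: tuple[tuple[str, tuple[str, ...]], ...] = (
--     ("call", ("call", "calls", "called", "invoke", "invokes", "invoked")),
--     ("import", ("import", "imports", "imported", "module", "modules")),
--     ("field", ("field", "fields", "member", "members", "property", "properties")),
--     ("parameter_type", ("parameter", "parameters", "param", "params", "argument", "arguments")),
--     ("return_type", ("return", "returns", "returned")),
--     ("generic_arg", ("generic", "generics", "template", "templates")),
-- )
--
-- # Reverse index: every hint word maps to its context tag (hint tuples are disjoint).
-- _HINT_TO_TAG = {hint: context for context, hints in _CONTEXT_HINTS for hint in hints}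
--
-- def _infer_context_filters(question: str) -> list[str]:
--     found: set[str] = set()
--     for token in question.replace("?", " ").replace(",", " ").split():
--         tag = _HINT_TO_TAG.get(_strip_diacritics(token).lower())
--         if tag is not None:
--             found.add(tag)
--     return [context for context, _ in _CONTEXT_HINTS if context in found]
-- ===== Notes on version B (the rewrite author's own statement) =====
-- stated objective: idiomatic
-- what changed: Replaced the per-context scan over each hint tuple with a prebuilt reverse dict mapping every hint word to its context tag: one pass over the question's tokens collects matched tags into a set, then contexts are emitted in _CONTEXT_HINTS order.
import Mathlib
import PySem

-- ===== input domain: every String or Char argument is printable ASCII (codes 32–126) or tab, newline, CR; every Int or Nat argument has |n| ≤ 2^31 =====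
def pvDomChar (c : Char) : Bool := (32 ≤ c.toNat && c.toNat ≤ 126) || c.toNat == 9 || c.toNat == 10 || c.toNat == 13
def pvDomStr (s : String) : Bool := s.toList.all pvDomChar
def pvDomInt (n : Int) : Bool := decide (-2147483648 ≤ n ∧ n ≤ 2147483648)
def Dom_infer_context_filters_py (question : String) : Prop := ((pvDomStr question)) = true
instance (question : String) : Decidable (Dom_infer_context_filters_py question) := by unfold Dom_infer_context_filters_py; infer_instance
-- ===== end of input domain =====

-- B replaces A's per-context scan over hint words with a prebuilt hint→tag reverse index and a
-- single pass over the question's tokens (objective: idiomatic/alternative; same observable value).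

-- ===== PORT A =====
-- _strip_diacritics = NFKD-normalize then drop combining marks; on the printable-ASCII domain Dom
-- this is exactly the identity (no ASCII character is combining and NFKD fixes ASCII), so it is
-- ported as the identity — exact on Dom.
def strip_diacritics_py (s : String) : String := s

-- module-level constant _CONTEXT_HINTS (shared by A and B, as in the Python module)
def CONTEXT_HINTS : List (String × List String) := [
  ("call", ["call","calls","called","invoke","invokes","invoked"]),
  ("import", ["import","imports","imported","module","modules"]),
  ("field", ["field","fields","member","members","property","properties"]),
  ("parameter_type", ["parameter","parameters","param","params","argument","arguments"]),
  ("return_type", ["return","returns","returned"]),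
  ("generic_arg", ["generic","generics","template","templates"])]

def infer_context_filters_py (question : String) : List String :=
  let lowered : PySem.Set String :=
    PySem.Set.ofList
      ((PySem.Str.split₀ (PySem.Str.replace (PySem.Str.replace question "?" " ") "," " ")).map
        (fun token => PySem.Str.lower (strip_diacritics_py token)))
  CONTEXT_HINTS.foldl
    (fun inferred ch =>
      if ch.2.any (fun hint => PySem.Set.contains lowered hint) then inferred ++ [ch.1] else inferred)
    []

-- ===== PORT B =====
-- _HINT_TO_TAG = {hint: context for context, hints in _CONTEXT_HINTS for hint in hints}
def HINT_TO_TAG : PySem.Dict String String :=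
  CONTEXT_HINTS.foldl (fun d ch => ch.2.foldl (fun d hint => d.insert hint ch.1) d) PySem.Dict.empty

def infer_context_filters_py_alt (question : String) : List String :=
  let found : PySem.Set String :=
    (PySem.Str.split₀ (PySem.Str.replace (PySem.Str.replace question "?" " ") "," " ")).foldl
      (fun s token =>
        match HINT_TO_TAG.get? (PySem.Str.lower (strip_diacritics_py token)) with
        | some tag => PySem.Set.add s tag
        | none => s)
      PySem.Set.empty
  (CONTEXT_HINTS.filter (fun ch => PySem.Set.contains found ch.1)).map (fun ch => ch.1)

-- ===== PRECONDITION & SPEC =====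
def Spec_infer_context_filters_py (question : String) (out : List String) : Prop := out = infer_context_filters_py_alt question
instance (question : String) (out : List String) : Decidable (Spec_infer_context_filters_py question out) := by unfold Spec_infer_context_filters_py; infer_instance

-- ===== CLAIM (what is proved, stated in full; the proofs are below) =====
def Claim_equal_infer_context_filters_py : Prop := ∀ (question : String), Dom_infer_context_filters_py question → Spec_infer_context_filters_py question (infer_context_filters_py question)

-- ===== LEMMAS AND PROOFS =====

set_option maxHeartbeats 1000000 in
lemma HINT_TO_TAG_items :
    HINT_TO_TAG.items = [("call", "call"), ("calls", "call"), ("called", "call"), ("invoke", "call"),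
      ("invokes", "call"), ("invoked", "call"), ("import", "import"), ("imports", "import"),
      ("imported", "import"), ("module", "import"), ("modules", "import"), ("field", "field"),
      ("fields", "field"), ("member", "field"), ("members", "field"), ("property", "field"),
      ("properties", "field"), ("parameter", "parameter_type"), ("parameters", "parameter_type"),
      ("param", "parameter_type"), ("params", "parameter_type"), ("argument", "parameter_type"),
      ("arguments", "parameter_type"), ("return", "return_type"), ("returns", "return_type"),
      ("returned", "return_type"), ("generic", "generic_arg"), ("generics", "generic_arg"),
      ("template", "generic_arg"), ("templates", "generic_arg")] := by rfl

set_option maxHeartbeats 1000000 in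
lemma HINT_TO_TAG_nodup_keys : HINT_TO_TAG.keys.Nodup := by decide

-- membership in the found-set built by B's token loop
lemma mem_found_foldl (key : String → String) (l : List String) (s : PySem.Set String) (c : String) :
    c ∈ l.foldl (fun s t =>
        match HINT_TO_TAG.get? (key t) with
        | some tag => PySem.Set.add s tag
        | none => s) s
      ↔ c ∈ s ∨ ∃ t ∈ l, HINT_TO_TAG.get? (key t) = some c := by
  induction l generalizing s with
  | nil => simp
  | cons t ts ih =>
    simp only [List.foldl_cons, List.mem_cons]
    rcases h : HINT_TO_TAG.get? (key t) with _ | tag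
    · rw [ih]
      constructor
      · rintro (hs | hex)
        · exact Or.inl hs
        · exact Or.inr ⟨hex.choose, Or.inr hex.choose_spec.1, hex.choose_spec.2⟩
      · rintro (hs | ⟨u, hu | hu, hg⟩)
        · exact Or.inl hs
        · exact absurd (hu ▸ hg) (by simp [h])
        · exact Or.inr ⟨u, hu, hg⟩
    · rw [ih]
      simp only [PySem.Set.mem_add]
      constructor
      · rintro ((hs | hc) | hex)
        · exact Or.inl hs
        · exact Or.inr ⟨t, Or.inl rfl, by rw [h, hc]⟩
        · exact Or.inr ⟨hex.choose, Or.inr hex.choose_spec.1, hex.choose_spec.2⟩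
      · rintro (hs | ⟨u, hu | hu, hg⟩)
        · exact Or.inl (Or.inl hs)
        · exact Or.inl (Or.inr (by subst hu; rw [h] at hg; exact (Option.some_inj.mp hg).symm))
        · exact Or.inr ⟨u, hu, hg⟩

lemma get?_HINT_TO_TAG (t c : String) :
    HINT_TO_TAG.get? t = some c ↔ (t, c) ∈ HINT_TO_TAG.items :=
  PySem.Dict.get?_eq_some_iff_mem_items HINT_TO_TAG t c HINT_TO_TAG_nodup_keys

lemma mem_items_call (v : String) : (v, "call") ∈ HINT_TO_TAG.items ↔ v ∈ (["call","calls","called","invoke","invokes","invoked"] : List String) := by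
  rw [HINT_TO_TAG_items]; simp

lemma mem_items_import (v : String) : (v, "import") ∈ HINT_TO_TAG.items ↔ v ∈ (["import","imports","imported","module","modules"] : List String) := by
  rw [HINT_TO_TAG_items]; simp

lemma mem_items_field (v : String) : (v, "field") ∈ HINT_TO_TAG.items ↔ v ∈ (["field","fields","member","members","property","properties"] : List String) := by
  rw [HINT_TO_TAG_items]; simp

lemma mem_items_parameter (v : String) : (v, "parameter_type") ∈ HINT_TO_TAG.items ↔ v ∈ (["parameter","parameters","param","params","argument","arguments"] : List String) := by
  rw [HINT_TO_TAG_items]; simp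

lemma mem_items_return (v : String) : (v, "return_type") ∈ HINT_TO_TAG.items ↔ v ∈ (["return","returns","returned"] : List String) := by
  rw [HINT_TO_TAG_items]; simp

lemma mem_items_generic (v : String) : (v, "generic_arg") ∈ HINT_TO_TAG.items ↔ v ∈ (["generic","generics","template","templates"] : List String) := by
  rw [HINT_TO_TAG_items]; simp

-- pure-logic bridge between A's per-context condition and B's found-set condition
lemma bridge_cond (g : String → String) (L hs : List String) (c : String)
    (hiff : ∀ v, (v, c) ∈ HINT_TO_TAG.items ↔ v ∈ hs) :
    (∃ x ∈ hs, ∃ a ∈ L, g a = x) ↔ (c ∈ PySem.Set.empty ∨ ∃ t ∈ L, HINT_TO_TAG.get? (g t) = some c) := by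
  constructor
  · rintro ⟨x, hx, a, ha, hga⟩
    exact Or.inr ⟨a, ha, (get?_HINT_TO_TAG _ _).mpr ((hiff _).mpr (hga ▸ hx))⟩
  · rintro (hc | ⟨t, ht, hg⟩)
    · simp [PySem.Set.empty] at hc
    · exact ⟨g t, (hiff _).mp ((get?_HINT_TO_TAG _ _).mp hg), t, ht, rfl⟩

-- ===== VERDICT (by name: the statement is the Claim_ definition above) =====
theorem infer_context_filters_py_spec : Claim_equal_infer_context_filters_py := by
  intro question _
  unfold Spec_infer_context_filters_py infer_context_filters_py infer_context_filters_py_alt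
  rw [PySem.List.foldl_append_if
    (fun ch : String × List String => ch.2.any (fun hint => PySem.Set.contains _ hint))
    (fun ch : String × List String => ch.1)]
  rw [List.nil_append]
  apply congrArg
  apply List.filter_congr
  intro ch hch
  rw [Bool.eq_iff_iff]
  simp only [List.any_eq_true, PySem.Set.contains, List.contains_iff_mem,
    PySem.Set.mem_ofList, List.mem_map, mem_found_foldl]
  simp only [CONTEXT_HINTS, List.mem_cons, List.not_mem_nil, or_false] at hch
  rcases hch with rfl | rfl | rfl | rfl | rfl | rfl
  · exact bridge_cond _ _ _ _ mem_items_call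
  · exact bridge_cond _ _ _ _ mem_items_import
  · exact bridge_cond _ _ _ _ mem_items_field
  · exact bridge_cond _ _ _ _ mem_items_parameter
  · exact bridge_cond _ _ _ _ mem_items_return
  · exact bridge_cond _ _ _ _ mem_items_generic
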